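-- pv_equiv track=rewrite | github.com/Coki628/kyopro_submissions | yukicoder/683.py | bfs
-- ===== SOURCE A (Python) =====
-- def bfs(src):
--     """ BFS(整数) """
--     from collections import deque
--
--     que = deque([src])
--     dist = set()
--     dist.add(src)
--     while que:
--         x, y = que.popleft()
--         if x == 0 or y == 0:
--             return True
--         if x % 2 == 0 and y > 0:
--             nx = x // 2
--             ny = y - 1
--             if (nx, ny) not in dist:
--                 dist.add((nx, ny))
--                 que.append((nx, ny))
--         if x > 0 and y % 2 == 0:
--             nx = x - 1
--             ny = y // 2
--             if (nx, ny) not in dist: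
--                 dist.add((nx, ny))
--                 que.append((nx, ny))
--     return False
-- ===== SOURCE B (Python) =====
-- def bfs(src):
--     """ Top-down recursive reachability over the same halving-move DAG
--     (every move halves one coordinate, so recursion depth is O(log|x|+log|y|)). """
--     def reach(x, y):
--         if x == 0 or y == 0:
--             return True
--         if x % 2 == 0 and y > 0:
--             if reach(x // 2, y - 1):
--                 return True
--         if x > 0 and y % 2 == 0:
--             if reach(x - 1, y // 2):
--                 return True
--         return False
--     x, y = src
--     return reach(x, y)
-- ===== Notes on version B (the rewrite author's own statement) =====
-- stated objective: simpler
-- what changed: Replaced the iterative BFS worklist (deque + visited set) by a direct top-down recursive predicate on the acyclic move graph, with no queue and no visited set.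
import Mathlib
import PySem

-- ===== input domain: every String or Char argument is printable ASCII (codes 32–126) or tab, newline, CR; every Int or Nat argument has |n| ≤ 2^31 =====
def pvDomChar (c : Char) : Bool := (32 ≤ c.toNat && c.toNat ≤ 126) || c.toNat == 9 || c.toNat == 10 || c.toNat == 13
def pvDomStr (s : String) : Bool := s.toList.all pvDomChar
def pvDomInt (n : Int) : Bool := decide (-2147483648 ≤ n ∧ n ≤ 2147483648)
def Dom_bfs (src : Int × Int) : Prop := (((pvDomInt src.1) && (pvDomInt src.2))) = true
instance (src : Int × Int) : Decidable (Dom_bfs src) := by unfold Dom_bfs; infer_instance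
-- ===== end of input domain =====

-- B replaces the iterative BFS worklist (deque + visited set) by a direct top-down
-- recursive predicate over the same acyclic move graph (objective: simpler).

-- ===== PORT A =====
-- helpers naming A's two successor states and the two sequential "if" steps of A's loop body
def pySucc1 (x y : Int) : Int × Int := (PySem.Int.floordiv x 2, y - 1)
def pySucc2 (x y : Int) : Int × Int := (x - 1, PySem.Int.floordiv y 2)
def cond1 (x y : Int) (dist : PySem.Set (Int × Int)) : Bool :=
  decide (PySem.Int.mod x 2 = 0) && decide (0 < y) && !(PySem.Set.contains dist (pySucc1 x y))
def enq1 (x y : Int) (dist : PySem.Set (Int × Int)) : List (Int × Int) :=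
  if cond1 x y dist then [pySucc1 x y] else []
def dist1 (x y : Int) (dist : PySem.Set (Int × Int)) : PySem.Set (Int × Int) :=
  if cond1 x y dist then PySem.Set.add dist (pySucc1 x y) else dist
def cond2 (x y : Int) (dist : PySem.Set (Int × Int)) : Bool :=
  decide (0 < x) && decide (PySem.Int.mod y 2 = 0) && !(PySem.Set.contains dist (pySucc2 x y))
def enq2 (x y : Int) (dist : PySem.Set (Int × Int)) : List (Int × Int) :=
  if cond2 x y dist then [pySucc2 x y] else []
def dist2 (x y : Int) (dist : PySem.Set (Int × Int)) : PySem.Set (Int × Int) :=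
  if cond2 x y dist then PySem.Set.add dist (pySucc2 x y) else dist

-- termination measures (each enqueued successor strictly shrinks |x|+|y|)
def mZ (s : Int × Int) : Nat := s.1.natAbs + s.2.natAbs
def muQ (l : List (Int × Int)) : Nat := (l.map (fun s => 3 ^ mZ s)).sum

theorem mZ_succ1_lt (x y : Int) (hx : x ≠ 0) (hm : PySem.Int.mod x 2 = 0) (hy : 0 < y) :
    mZ (pySucc1 x y) < mZ (x, y) := by
  rw [PySem.Int.mod_eq_emod_of_pos (by norm_num)] at hm
  obtain ⟨k, rfl⟩ := Int.dvd_of_emod_eq_zero hm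
  simp only [mZ, pySucc1, PySem.Int.floordiv_eq_ediv_of_pos (by norm_num : (0:Int) < 2),
    Int.mul_ediv_cancel_left _ (by norm_num : (2:Int) ≠ 0)]
  omega

theorem mZ_succ2_lt (x y : Int) (hy : y ≠ 0) (hm : PySem.Int.mod y 2 = 0) (hx : 0 < x) :
    mZ (pySucc2 x y) < mZ (x, y) := by
  rw [PySem.Int.mod_eq_emod_of_pos (by norm_num)] at hm
  obtain ⟨k, rfl⟩ := Int.dvd_of_emod_eq_zero hm
  simp only [mZ, pySucc2, PySem.Int.floordiv_eq_ediv_of_pos (by norm_num : (0:Int) < 2),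
    Int.mul_ediv_cancel_left _ (by norm_num : (2:Int) ≠ 0)]
  omega

theorem muQ_append (a b : List (Int × Int)) : muQ (a ++ b) = muQ a + muQ b := by
  simp [muQ]

theorem muQ_enq1 (x y : Int) (dist : PySem.Set (Int × Int)) (hx : x ≠ 0) :
    3 * muQ (enq1 x y dist) ≤ 3 ^ mZ (x, y) := by
  unfold enq1
  split_ifs with hc
  · simp only [cond1, Bool.and_eq_true, decide_eq_true_eq] at hc
    have hlt := mZ_succ1_lt x y hx hc.1.1 hc.1.2
    have : 3 ^ (mZ (pySucc1 x y) + 1) ≤ 3 ^ mZ (x, y) :=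
      Nat.pow_le_pow_right (by norm_num) (by omega)
    simp only [muQ, List.map_cons, List.map_nil, List.sum_cons, List.sum_nil]
    omega
  · simp [muQ]

theorem muQ_enq2 (x y : Int) (dist : PySem.Set (Int × Int)) (hy : y ≠ 0) :
    3 * muQ (enq2 x y dist) ≤ 3 ^ mZ (x, y) := by
  unfold enq2
  split_ifs with hc
  · simp only [cond2, Bool.and_eq_true, decide_eq_true_eq] at hc
    have hlt := mZ_succ2_lt x y hy hc.1.2 hc.1.1
    have : 3 ^ (mZ (pySucc2 x y) + 1) ≤ 3 ^ mZ (x, y) :=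
      Nat.pow_le_pow_right (by norm_num) (by omega)
    simp only [muQ, List.map_cons, List.map_nil, List.sum_cons, List.sum_nil]
    omega
  · simp [muQ]

theorem muQ_step (x y : Int) (rest : List (Int × Int)) (dist : PySem.Set (Int × Int))
    (hx : x ≠ 0) (hy : y ≠ 0) :
    muQ ((rest ++ enq1 x y dist) ++ enq2 x y (dist1 x y dist)) < muQ ((x, y) :: rest) := by
  have h1 := muQ_enq1 x y dist hx
  have h2 := muQ_enq2 x y (dist1 x y dist) hy
  have hM : 1 ≤ 3 ^ mZ (x, y) := Nat.one_le_pow _ _ (by norm_num)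
  have hcons : muQ ((x, y) :: rest) = 3 ^ mZ (x, y) + muQ rest := by
    simp [muQ]
  rw [muQ_append, muQ_append, hcons]
  omega

-- the while-loop of A: pop from the left, test, push guarded unvisited successors
def bfsLoop : List (Int × Int) → PySem.Set (Int × Int) → Bool
  | [], _ => false
  | (x, y) :: rest, dist =>
    if x = 0 ∨ y = 0 then true
    else bfsLoop ((rest ++ enq1 x y dist) ++ enq2 x y (dist1 x y dist)) (dist2 x y (dist1 x y dist))
  termination_by que _ => muQ que
  decreasing_by exact muQ_step x y rest dist (fun h => by simp [h] at *) (fun h => by simp [h] at *)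

def bfs (src : Int × Int) : Bool := bfsLoop [src] (PySem.Set.add PySem.Set.empty src)

-- ===== PORT B =====
def reachB (x y : Int) : Bool :=
  if x = 0 ∨ y = 0 then true
  else
    if (if h1 : PySem.Int.mod x 2 = 0 ∧ 0 < y then reachB (PySem.Int.floordiv x 2) (y - 1) else false)
    then true
    else
      if (if h2 : 0 < x ∧ PySem.Int.mod y 2 = 0 then reachB (x - 1) (PySem.Int.floordiv y 2) else false)
      then true
      else false
  termination_by mZ (x, y)
  decreasing_by
  · exact mZ_succ1_lt x y (fun h => ‹¬(x = 0 ∨ y = 0)› (Or.inl h)) h1.1 h1.2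
  · exact mZ_succ2_lt x y (fun h => ‹¬(x = 0 ∨ y = 0)› (Or.inr h)) h2.2 h2.1

def bfs_alt (src : Int × Int) : Bool := reachB src.1 src.2

-- ===== PRECONDITION & SPEC =====
def Spec_bfs (src : Int × Int) (out : Bool) : Prop := out = bfs_alt src
instance (src : Int × Int) (out : Bool) : Decidable (Spec_bfs src out) := by unfold Spec_bfs; infer_instance

-- ===== CLAIM (what is proved, stated in full; the proofs are below) =====
def Claim_equal_bfs : Prop := ∀ (src : Int × Int), Dom_bfs src → Spec_bfs src (bfs src)

-- ===== LEMMAS AND PROOFS =====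

-- abstract view used only by the proofs
def Zz (s : Int × Int) : Prop := s.1 = 0 ∨ s.2 = 0

def Sucs (s : Int × Int) : List (Int × Int) :=
  (if PySem.Int.mod s.1 2 = 0 ∧ 0 < s.2 then [pySucc1 s.1 s.2] else []) ++
  (if 0 < s.1 ∧ PySem.Int.mod s.2 2 = 0 then [pySucc2 s.1 s.2] else [])

theorem reachB_of_Z (s : Int × Int) (h : Zz s) : reachB s.1 s.2 = true := by
  unfold Zz at h
  rw [reachB, if_pos h]

theorem reachB_iff (s : Int × Int) (h : ¬ Zz s) :
    reachB s.1 s.2 = true ↔ ∃ t ∈ Sucs s, reachB t.1 t.2 = true := by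
  obtain ⟨x, y⟩ := s
  simp only [Zz] at h
  rw [reachB, if_neg h]
  by_cases hc1 : PySem.Int.mod x 2 = 0 ∧ 0 < y <;>
    by_cases hc2 : 0 < x ∧ PySem.Int.mod y 2 = 0 <;>
    simp [Sucs, hc1, hc2, pySucc1, pySucc2] <;> aesop

theorem reachB_of_suc (s t : Int × Int) (ht : t ∈ Sucs s) (hr : reachB t.1 t.2 = true) :
    reachB s.1 s.2 = true := by
  by_cases hz : Zz s
  · exact reachB_of_Z s hz
  · exact (reachB_iff s hz).mpr ⟨t, ht, hr⟩

theorem mZ_lt_of_mem_sucs (s t : Int × Int) (h : ¬ Zz s) (ht : t ∈ Sucs s) : mZ t < mZ s := by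
  obtain ⟨x, y⟩ := s
  simp only [Zz, not_or] at h
  simp only [Sucs, List.mem_append] at ht
  rcases ht with ht | ht <;> rw [List.mem_ite_nil_right] at ht
  · obtain ⟨⟨hm, hy⟩, hmem⟩ := ht
    rw [List.mem_singleton] at hmem; subst hmem
    exact mZ_succ1_lt x y h.1 hm hy
  · obtain ⟨⟨hx, hm⟩, hmem⟩ := ht
    rw [List.mem_singleton] at hmem; subst hmem
    exact mZ_succ2_lt x y h.2 hm hx

theorem all_false (dist : PySem.Set (Int × Int))
    (hexp : ∀ u ∈ dist, ¬ Zz u ∧ ∀ t ∈ Sucs u, t ∈ dist) :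
    ∀ s ∈ dist, reachB s.1 s.2 = false := by
  suffices h : ∀ (n : Nat) (s : Int × Int), mZ s = n → s ∈ dist → reachB s.1 s.2 = false by
    intro s hs; exact h (mZ s) s rfl hs
  intro n
  induction n using Nat.strong_induction_on with
  | _ n IH =>
    intro s hmz hs
    obtain ⟨hnz, hsuc⟩ := hexp s hs
    by_contra hcon
    rw [Bool.not_eq_false] at hcon
    obtain ⟨t, ht, hrt⟩ := (reachB_iff s hnz).mp hcon
    have := IH (mZ t) (hmz ▸ mZ_lt_of_mem_sucs s t hnz ht) t rfl (hsuc t ht)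
    rw [this] at hrt; exact Bool.false_ne_true hrt

theorem cond1_spec (x y : Int) (dist : PySem.Set (Int × Int)) (hc : cond1 x y dist = true) :
    PySem.Int.mod x 2 = 0 ∧ 0 < y := by
  simp only [cond1, Bool.and_eq_true, decide_eq_true_eq] at hc
  exact ⟨hc.1.1, hc.1.2⟩

theorem cond2_spec (x y : Int) (dist : PySem.Set (Int × Int)) (hc : cond2 x y dist = true) :
    0 < x ∧ PySem.Int.mod y 2 = 0 := by
  simp only [cond2, Bool.and_eq_true, decide_eq_true_eq] at hc
  exact ⟨hc.1.1, hc.1.2⟩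

theorem mem_dist1 (x y : Int) (dist : PySem.Set (Int × Int)) (s : Int × Int) (hs : s ∈ dist) :
    s ∈ dist1 x y dist := by
  unfold dist1; split_ifs
  · exact (PySem.Set.mem_add _ _ _).mpr (Or.inl hs)
  · exact hs

theorem mem_dist2 (x y : Int) (dist : PySem.Set (Int × Int)) (s : Int × Int) (hs : s ∈ dist) :
    s ∈ dist2 x y dist := by
  unfold dist2; split_ifs
  · exact (PySem.Set.mem_add _ _ _).mpr (Or.inl hs)
  · exact hs

theorem mem_dist1_cases (x y : Int) (dist : PySem.Set (Int × Int)) (s : Int × Int)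
    (hs : s ∈ dist1 x y dist) :
    s ∈ dist ∨ (cond1 x y dist = true ∧ s = pySucc1 x y) := by
  unfold dist1 at hs; split_ifs at hs with hc
  · rcases (PySem.Set.mem_add _ _ _).mp hs with h | h
    · exact Or.inl h
    · exact Or.inr ⟨hc, h⟩
  · exact Or.inl hs

theorem mem_dist2_cases (x y : Int) (dist : PySem.Set (Int × Int)) (s : Int × Int)
    (hs : s ∈ dist2 x y dist) :
    s ∈ dist ∨ (cond2 x y dist = true ∧ s = pySucc2 x y) := by
  unfold dist2 at hs; split_ifs at hs with hc
  · rcases (PySem.Set.mem_add _ _ _).mp hs with h | h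
    · exact Or.inl h
    · exact Or.inr ⟨hc, h⟩
  · exact Or.inl hs

theorem succ1_mem_dist1 (x y : Int) (dist : PySem.Set (Int × Int))
    (hm : PySem.Int.mod x 2 = 0) (hy : 0 < y) : pySucc1 x y ∈ dist1 x y dist := by
  by_cases hmem : pySucc1 x y ∈ dist
  · exact mem_dist1 x y dist _ hmem
  · have hc : cond1 x y dist = true := by
      by_cases hb : PySem.Set.contains dist (pySucc1 x y) = true
      · exact absurd ((PySem.Set.contains_iff _ _).mp hb) hmem
      · simp only [cond1, hm, hy]; simp at hb ⊢; exact hb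
    unfold dist1; rw [if_pos hc]
    exact (PySem.Set.mem_add _ _ _).mpr (Or.inr rfl)

theorem succ2_mem_dist2 (x y : Int) (dist : PySem.Set (Int × Int))
    (hx : 0 < x) (hm : PySem.Int.mod y 2 = 0) : pySucc2 x y ∈ dist2 x y dist := by
  by_cases hmem : pySucc2 x y ∈ dist
  · exact mem_dist2 x y dist _ hmem
  · have hc : cond2 x y dist = true := by
      by_cases hb : PySem.Set.contains dist (pySucc2 x y) = true
      · exact absurd ((PySem.Set.contains_iff _ _).mp hb) hmem
      · simp only [cond2, hx, hm]; simp at hb ⊢; exact hb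
    unfold dist2; rw [if_pos hc]
    exact (PySem.Set.mem_add _ _ _).mpr (Or.inr rfl)

theorem mem_enq1_cases (x y : Int) (dist : PySem.Set (Int × Int)) (s : Int × Int)
    (hs : s ∈ enq1 x y dist) : cond1 x y dist = true ∧ s = pySucc1 x y := by
  unfold enq1 at hs; split_ifs at hs with hc
  · rw [List.mem_singleton] at hs; exact ⟨hc, hs⟩
  · simp at hs

theorem mem_enq2_cases (x y : Int) (dist : PySem.Set (Int × Int)) (s : Int × Int)
    (hs : s ∈ enq2 x y dist) : cond2 x y dist = true ∧ s = pySucc2 x y := by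
  unfold enq2 at hs; split_ifs at hs with hc
  · rw [List.mem_singleton] at hs; exact ⟨hc, hs⟩
  · simp at hs

theorem enq1_mem_self (x y : Int) (dist : PySem.Set (Int × Int)) (hc : cond1 x y dist = true) :
    pySucc1 x y ∈ enq1 x y dist := by
  unfold enq1; rw [if_pos hc]; exact List.mem_singleton.mpr rfl

theorem enq2_mem_self (x y : Int) (dist : PySem.Set (Int × Int)) (hc : cond2 x y dist = true) :
    pySucc2 x y ∈ enq2 x y dist := by
  unfold enq2; rw [if_pos hc]; exact List.mem_singleton.mpr rfl

theorem sucs_sub_dist2 (x y : Int) (dist : PySem.Set (Int × Int)) (t : Int × Int)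
    (ht : t ∈ Sucs (x, y)) : t ∈ dist2 x y (dist1 x y dist) := by
  rcases List.mem_append.mp ht with ht | ht <;> rw [List.mem_ite_nil_right] at ht
  · obtain ⟨⟨hm, hy'⟩, htm⟩ := ht; rw [List.mem_singleton] at htm; subst htm
    exact mem_dist2 _ _ _ _ (succ1_mem_dist1 x y dist hm hy')
  · obtain ⟨⟨hx', hm⟩, htm⟩ := ht; rw [List.mem_singleton] at htm; subst htm
    exact succ2_mem_dist2 x y _ hx' hm

theorem bfsLoop_correct (src : Int × Int) : ∀ (n : Nat) (que : List (Int × Int)) (dist : PySem.Set (Int × Int)),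
    muQ que = n →
    (∀ s ∈ que, s ∈ dist) →
    (∀ s ∈ dist, s ∈ que ∨ (¬ Zz s ∧ ∀ t ∈ Sucs s, t ∈ dist)) →
    (∀ s ∈ dist, reachB s.1 s.2 = true → reachB src.1 src.2 = true) →
    src ∈ dist →
    bfsLoop que dist = reachB src.1 src.2 := by
  intro n
  induction n using Nat.strong_induction_on with
  | _ n IH =>
    intro que dist hn hsub hexp hup hsrc
    rcases que with _ | ⟨⟨x, y⟩, rest⟩
    · have hall : ∀ u ∈ dist, ¬ Zz u ∧ ∀ t ∈ Sucs u, t ∈ dist := by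
        intro u hu
        rcases hexp u hu with h | h
        · simp at h
        · exact h
      rw [bfsLoop, all_false dist hall src hsrc]
    · by_cases hz : x = 0 ∨ y = 0
      · rw [bfsLoop, if_pos hz]
        exact (hup (x, y) (hsub _ List.mem_cons_self) (reachB_of_Z (x, y) hz)).symm
      · have hx : x ≠ 0 := fun h => hz (Or.inl h)
        have hy : y ≠ 0 := fun h => hz (Or.inr h)
        have hxyd : (x, y) ∈ dist := hsub _ List.mem_cons_self
        rw [bfsLoop, if_neg hz]
        apply IH (muQ ((rest ++ enq1 x y dist) ++ enq2 x y (dist1 x y dist)))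
          (hn ▸ muQ_step x y rest dist hx hy) _ _ rfl
        · intro s hsq
          rcases List.mem_append.mp hsq with hsq | hsq
        -- rest/enq1 part
          · rcases List.mem_append.mp hsq with hsq | hsq
            · exact mem_dist2 _ _ _ _ (mem_dist1 _ _ _ _ (hsub s (List.mem_cons_of_mem _ hsq)))
            · obtain ⟨hc, rfl⟩ := mem_enq1_cases _ _ _ _ hsq
              obtain ⟨hm, hy'⟩ := cond1_spec _ _ _ hc
              exact mem_dist2 _ _ _ _ (succ1_mem_dist1 x y dist hm hy')
          · obtain ⟨hc, rfl⟩ := mem_enq2_cases _ _ _ _ hsq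
            obtain ⟨hx', hm⟩ := cond2_spec _ _ _ hc
            exact succ2_mem_dist2 x y _ hx' hm
        · intro s hsd
          rcases mem_dist2_cases _ _ _ _ hsd with hsd1 | ⟨hc2, rfl⟩
          · rcases mem_dist1_cases _ _ _ _ hsd1 with hsd0 | ⟨hc1, rfl⟩
            · rcases hexp s hsd0 with hq | ⟨hnz', hsc⟩
              · rcases List.mem_cons.mp hq with rfl | hq
                · exact Or.inr ⟨hz, fun t ht => sucs_sub_dist2 x y dist t ht⟩
                · exact Or.inl (List.mem_append_left _ (List.mem_append_left _ hq))
              · exact Or.inr ⟨hnz', fun t ht => mem_dist2 _ _ _ _ (mem_dist1 _ _ _ _ (hsc t ht))⟩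
            · exact Or.inl (List.mem_append_left _ (List.mem_append_right _ (enq1_mem_self x y dist hc1)))
          · exact Or.inl (List.mem_append_right _ (enq2_mem_self x y _ hc2))
        · intro s hsd hrs
          rcases mem_dist2_cases _ _ _ _ hsd with hsd1 | ⟨hc2, rfl⟩
          · rcases mem_dist1_cases _ _ _ _ hsd1 with hsd0 | ⟨hc1, rfl⟩
            · exact hup s hsd0 hrs
            · have hsc : pySucc1 x y ∈ Sucs (x, y) := by
                obtain ⟨hm, hy'⟩ := cond1_spec _ _ _ hc1
                rw [PySem.Int.mod_eq_emod_of_pos (by norm_num)] at hm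
                simp [Sucs, hy']
                exact Or.inl (Int.dvd_of_emod_eq_zero hm)
              exact hup (x, y) hxyd (reachB_of_suc (x, y) _ hsc hrs)
          · have hsc : pySucc2 x y ∈ Sucs (x, y) := by
              obtain ⟨hx', hm⟩ := cond2_spec _ _ _ hc2
              rw [PySem.Int.mod_eq_emod_of_pos (by norm_num)] at hm
              simp [Sucs, hx']
              exact Or.inr (Int.dvd_of_emod_eq_zero hm)
            exact hup (x, y) hxyd (reachB_of_suc (x, y) _ hsc hrs)
        · exact mem_dist2 _ _ _ _ (mem_dist1 _ _ _ _ hsrc)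

-- ===== VERDICT (by name: the statement is the Claim_ definition above) =====
theorem bfs_spec : Claim_equal_bfs := by
  unfold Claim_equal_bfs
  intro src _
  unfold Spec_bfs bfs bfs_alt
  have hempty : PySem.Set.add PySem.Set.empty src = [src] := by
    simp [PySem.Set.add_of_not_mem, PySem.Set.empty]
  rw [hempty]
  apply bfsLoop_correct src (muQ [src]) [src] [src] rfl
  · intro s hs; exact hs
  · intro s hs; exact Or.inl hs
  · intro s hs hrs; rw [List.mem_singleton] at hs; subst hs; exact hrs
  · exact List.mem_singleton.mpr rfl
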